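-- pv_equiv track=rewrite | github.com/nevernorbo/repository-agent | repository_api/benchmarks/benchmark_runners/retrieval_quality.py | _match_against_ground_truth
-- ===== SOURCE A (Python) =====
-- from typing import Any, Dict, List, Set
--
-- def _match_against_ground_truth(retrieved_paths: List[str], gt_substrings: Set[str]) -> List[str]:
--     """Check which retrieved paths match any ground truth substring.
--     Returns a list of 'relevant'/'not_relevant' in order, for metric computation.
--     """
--     result_ids = []
--     for path in retrieved_paths:
--         if any(sub in path for sub in gt_substrings):
--             result_ids.append(path)  # counts as relevant
--         else:
--             result_ids.append(f"__irrelevant__{path}")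
--     return result_ids
-- ===== SOURCE B (Python) =====
-- from typing import List, Set
--
-- def _match_against_ground_truth(retrieved_paths: List[str], gt_substrings: Set[str]) -> List[str]:
--     """Build a first-character index of the patterns once, then scan each path
--     position-major: at each position only the patterns bucketed under that
--     character are tested as prefixes (an empty pattern matches everything)."""
--     buckets = {}
--     has_empty = False
--     for p in gt_substrings:
--         if p == "":
--             has_empty = True
--         else:
--             buckets.setdefault(p[0], []).append(p)
--     out = []
--     for path in retrieved_paths:
--         hit = has_empty
--         if not hit:
--             for i, c in enumerate(path):
--                 if c in buckets and any(path.startswith(p, i) for p in buckets[c]):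
--                     hit = True
--                     break
--         out.append(path if hit else f"__irrelevant__{path}")
--     return out
-- ===== Notes on version B (the rewrite author's own statement) =====
-- stated objective: alternative
-- what changed: Instead of testing each pattern against each path with 'sub in path', B builds a first-character index of the patterns once and scans each path position-major, testing only the patterns bucketed under the character at each position as prefixes there (empty patterns match everything).
import Mathlib
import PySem

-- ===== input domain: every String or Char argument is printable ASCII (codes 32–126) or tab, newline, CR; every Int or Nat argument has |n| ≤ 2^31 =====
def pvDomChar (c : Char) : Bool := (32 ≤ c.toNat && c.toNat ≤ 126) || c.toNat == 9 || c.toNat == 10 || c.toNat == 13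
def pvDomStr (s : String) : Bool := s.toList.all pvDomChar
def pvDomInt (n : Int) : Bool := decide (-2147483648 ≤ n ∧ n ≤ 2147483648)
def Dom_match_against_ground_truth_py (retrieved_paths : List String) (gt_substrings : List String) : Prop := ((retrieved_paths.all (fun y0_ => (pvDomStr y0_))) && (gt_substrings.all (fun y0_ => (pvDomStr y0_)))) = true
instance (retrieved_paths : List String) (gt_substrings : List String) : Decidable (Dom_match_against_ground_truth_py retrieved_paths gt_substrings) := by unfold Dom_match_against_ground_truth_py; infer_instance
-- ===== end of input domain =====

-- B replaces the pattern-major 'sub in path' tests by a first-character pattern index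
-- built once, scanning each path position-major and testing only the bucketed patterns
-- as prefixes there (alternative decomposition; no speed claim).

-- ===== PORT A =====
def match_against_ground_truth_py (retrieved_paths : List String) (gt_substrings : List String) : List String :=
  retrieved_paths.foldl
    (fun result_ids path =>
      if gt_substrings.any (fun sub => PySem.Str.isIn sub path) then
        result_ids ++ [path]
      else
        result_ids ++ ["__irrelevant__" ++ path])
    []

-- ===== PORT B =====
-- one step of B's index-building loop: 'if p == "": has_empty = True
--                                       else: buckets.setdefault(p[0], []).append(p)'
-- (p[0] ported as headD: the else-branch guarantees p is nonempty, so headD IS p[0])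
def pvBucketStep (st : PySem.Dict Char (List String) × Bool) (p : String) :
    PySem.Dict Char (List String) × Bool :=
  if p = "" then (st.1, true)
  else
    (st.1.insert (p.toList.headD 'a') ((st.1.getD (p.toList.headD 'a') []) ++ [p]), st.2)

def match_against_ground_truth_py_alt (retrieved_paths : List String) (gt_substrings : List String) : List String :=
  let st := gt_substrings.foldl pvBucketStep (PySem.Dict.empty, false)
  retrieved_paths.foldl
    (fun out path =>
      -- 'hit = has_empty; if not hit: for i, c in enumerate(path): if c in buckets and
      --  any(path.startswith(p, i) …): hit = True; break'
      -- (path.startswith(p, i) ported as startswith(path[i:], p): exact for the i ≥ 0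
      --  that enumerate yields)
      let hit := st.2 ||
        (PySem.List.enumerate path.toList 0).any (fun ic =>
          st.1.contains ic.2 &&
            ((st.1.get? ic.2).getD []).any (fun p =>
              PySem.Str.startswith (PySem.Str.slice path (some ic.1) none) p))
      out ++ [if hit then path else "__irrelevant__" ++ path])
    []

-- ===== PRECONDITION & SPEC =====
def Spec_match_against_ground_truth_py (retrieved_paths : List String) (gt_substrings : List String) (out : List String) : Prop := out = match_against_ground_truth_py_alt retrieved_paths gt_substrings
instance (retrieved_paths : List String) (gt_substrings : List String) (out : List String) : Decidable (Spec_match_against_ground_truth_py retrieved_paths gt_substrings out) := by unfold Spec_match_against_ground_truth_py; infer_instance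

-- ===== CLAIM (what is proved, stated in full; the proofs are below) =====
def Claim_equal_match_against_ground_truth_py : Prop := ∀ (retrieved_paths : List String) (gt_substrings : List String), Dom_match_against_ground_truth_py retrieved_paths gt_substrings → Spec_match_against_ground_truth_py retrieved_paths gt_substrings (match_against_ground_truth_py retrieved_paths gt_substrings)

-- ===== LEMMAS AND PROOFS =====

-- the has_empty flag after the index-building loop
theorem pv_bucket_snd (pats : List String) (d : PySem.Dict Char (List String)) (b : Bool) :
    (pats.foldl pvBucketStep (d, b)).2 = (b || pats.any (fun p => p == "")) := by
  induction pats generalizing d b with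
  | nil => simp
  | cons p t ih =>
    simp only [List.foldl_cons, List.any_cons]
    by_cases hp : p = ""
    · simp [pvBucketStep, hp, ih]
    · rw [show (p == "") = false from beq_eq_false_iff_ne.mpr hp]
      simp [pvBucketStep, hp, ih]

-- the bucket of a character after the index-building loop
theorem pv_bucket_getD (pats : List String) (d : PySem.Dict Char (List String)) (b : Bool)
    (c : Char) :
    (pats.foldl pvBucketStep (d, b)).1.getD c [] =
      d.getD c [] ++ pats.filter (fun p => !(p == "") && (p.toList.headD 'a' == c)) := by
  induction pats generalizing d b with
  | nil => simp
  | cons p t ih =>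
    simp only [List.foldl_cons, List.filter_cons]
    by_cases hp : p = ""
    · simp [pvBucketStep, hp, ih]
    · rw [List.headD_eq_head?_getD] at *
      by_cases hc : p.toList.head?.getD 'a' = c
      · rw [show pvBucketStep (d, b) p =
            (d.insert (p.toList.headD 'a') ((d.getD (p.toList.headD 'a') []) ++ [p]), b) from
            by simp [pvBucketStep, hp]]
        rw [ih]
        simp only [List.headD_eq_head?_getD]
        rw [hc, PySem.Dict.getD_insert_self]
        simp [hp]
      · rw [show pvBucketStep (d, b) p =
            (d.insert (p.toList.headD 'a') ((d.getD (p.toList.headD 'a') []) ++ [p]), b) from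
            by simp [pvBucketStep, hp]]
        rw [ih]
        simp only [List.headD_eq_head?_getD]
        rw [PySem.Dict.getD_insert_of_ne _ _ _ (fun h => hc h.symm)]
        simp [hp, hc]

-- the 'c in buckets' guard is absorbed by the empty-default lookup
theorem pv_contains_absorb (d : PySem.Dict Char (List String)) (c : Char)
    (f : String → Bool) :
    (d.contains c && ((d.get? c).getD []).any f) = ((d.get? c).getD []).any f := by
  cases hc : d.contains c
  · rw [(PySem.Dict.get?_eq_none_iff_contains d c).mpr (by simp [hc])]
    simp
  · simp

-- the two relevance tests agree on every path
theorem pv_hit_eq (pats : List String) (path : String) :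
    pats.any (fun sub => PySem.Str.isIn sub path) =
      (let st := pats.foldl pvBucketStep (PySem.Dict.empty, false)
       st.2 ||
        (PySem.List.enumerate path.toList 0).any (fun ic =>
          st.1.contains ic.2 &&
            ((st.1.get? ic.2).getD []).any (fun p =>
              PySem.Str.startswith (PySem.Str.slice path (some ic.1) none) p))) := by
  simp only []
  rw [pv_bucket_snd, Bool.eq_iff_iff]
  simp only [Bool.false_or, Bool.or_eq_true, List.any_eq_true, beq_iff_eq]
  constructor
  · rintro ⟨sub, hmem, hin⟩
    rw [PySem.Str.isIn_eq, ← PySem.Chars.exists_prefix_drop_iff_isIn] at hin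
    obtain ⟨j, hj⟩ := hin
    by_cases hsub : sub = ""
    · exact Or.inl ⟨sub, hmem, hsub⟩
    · right
      have hne : sub.toList ≠ [] := fun hn => hsub (String.toList_inj.mp (by simpa using hn))
      have hdj : path.toList.drop j ≠ [] := by
        intro hnil
        rw [hnil] at hj
        exact hne (List.prefix_nil.mp hj)
      have hjlt : j < path.toList.length := by
        by_contra hle
        exact hdj (List.drop_eq_nil_of_le (by omega))
      refine ⟨(0 + (j : Int), path.toList[j]), ?_, ?_⟩
      · rw [PySem.List.mem_enumerate_iff]
        exact ⟨j, hjlt, rfl⟩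
      · rw [pv_contains_absorb]
        have hbucket : ((pats.foldl pvBucketStep (PySem.Dict.empty, false)).1.get?
            path.toList[j]).getD [] =
            pats.filter (fun p => !(p == "") && (p.toList.headD 'a' == path.toList[j])) := by
          have := pv_bucket_getD pats PySem.Dict.empty false path.toList[j]
          simpa using this
        rw [hbucket]
        simp only [List.any_eq_true, List.mem_filter, Bool.and_eq_true, Bool.not_eq_eq_eq_not,
          Bool.not_true, beq_eq_false_iff_ne, ne_eq, beq_iff_eq]
        refine ⟨sub, ⟨hmem, hsub, ?_⟩, ?_⟩
        · -- head of sub is path[j], because sub is a nonempty prefix of drop j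
          obtain ⟨t, ht⟩ := hj
          obtain ⟨c0, rest, hco⟩ := List.exists_cons_of_ne_nil hne
          have h2 : path.toList[j]? = some c0 := by
            rw [← List.head?_drop, ← ht, hco]
            rfl
          rw [List.getElem?_eq_getElem hjlt] at h2
          have : path.toList[j] = c0 := Option.some.inj h2
          rw [hco, this]
          rfl
        · rw [PySem.Str.startswith_eq, PySem.Chars.startswith_iff]
          simp only [PySem.Str.slice, PySem.Chars.slice_eq_listSlice, String.toList_ofList]
          rw [zero_add, PySem.List.slice_from_natCast]
          exact hj
  · rintro (⟨sub, hmem, hsub⟩ | ⟨ic, hic, hany⟩)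
    · refine ⟨sub, hmem, ?_⟩
      rw [PySem.Str.isIn_eq, hsub]
      exact PySem.Chars.isIn_nil path.toList
    · rw [PySem.List.mem_enumerate_iff] at hic
      obtain ⟨k, hk, hik⟩ := hic
      rw [hik, pv_contains_absorb] at hany
      have hbucket : ((pats.foldl pvBucketStep (PySem.Dict.empty, false)).1.get?
          path.toList[k]).getD [] =
          pats.filter (fun p => !(p == "") && (p.toList.headD 'a' == path.toList[k])) := by
        have := pv_bucket_getD pats PySem.Dict.empty false path.toList[k]
        simpa using this
      rw [hbucket] at hany
      rw [List.any_eq_true] at hany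
      obtain ⟨p, hpmem, hsw⟩ := hany
      refine ⟨p, (List.mem_filter.mp hpmem).1, ?_⟩
      rw [PySem.Str.startswith_eq, PySem.Chars.startswith_iff] at hsw
      simp only [PySem.Str.slice, PySem.Chars.slice_eq_listSlice, String.toList_ofList] at hsw
      rw [zero_add, PySem.List.slice_from_natCast] at hsw
      rw [PySem.Str.isIn_eq, ← PySem.Chars.exists_prefix_drop_iff_isIn]
      exact ⟨k, hsw⟩

-- the two loops produce the same list from any accumulator
theorem pv_fold_eq (gs : List String) (ps : List String) (acc : List String) :
    ps.foldl
      (fun result_ids path =>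
        if gs.any (fun sub => PySem.Str.isIn sub path) then
          result_ids ++ [path]
        else
          result_ids ++ ["__irrelevant__" ++ path]) acc =
    ps.foldl
      (fun out path =>
        let st := gs.foldl pvBucketStep (PySem.Dict.empty, false)
        let hit := st.2 ||
          (PySem.List.enumerate path.toList 0).any (fun ic =>
            st.1.contains ic.2 &&
              ((st.1.get? ic.2).getD []).any (fun p =>
                PySem.Str.startswith (PySem.Str.slice path (some ic.1) none) p))
        out ++ [if hit then path else "__irrelevant__" ++ path]) acc := by
  induction ps generalizing acc with
  | nil => rfl
  | cons p t ih =>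
    simp only [List.foldl_cons]
    rw [ih]
    congr 1
    rw [← pv_hit_eq gs p]
    split <;> rfl

-- ===== VERDICT (by name: the statement is the Claim_ definition above) =====
theorem match_against_ground_truth_py_spec : Claim_equal_match_against_ground_truth_py := by
  intro retrieved_paths gt_substrings _
  unfold Spec_match_against_ground_truth_py
  unfold match_against_ground_truth_py match_against_ground_truth_py_alt
  exact pv_fold_eq gt_substrings retrieved_paths []
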